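-- pv_equiv track=rewrite | github.com/mmh132/ProjectEuler | work/tri.py | nohype
-- ===== SOURCE A (Python) =====
-- def nohype(sub):
--     recurrence = [1,2]
--     m,n = recurrence[-1],recurrence[-2]
--     psum = 0
--     other = []
--     while 2*m**2 + 2*m*n < sub:
--         psum += (2*m**2 + 2*m*n)
--         other.append(2*m**2 + 2*m*n)
--         recurrence.append(recurrence[-1]*2 + recurrence[-2])
--         recurrence.pop(0)
--         m,n = recurrence[-1],recurrence[-2]
--
--     return other
-- ===== SOURCE B (Python) =====
-- def nohype(sub):
--     out = []
--     prev, cur = 2, 12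
--     while cur < sub:
--         out.append(cur)
--         prev, cur = cur, 6 * cur - prev
--     return out
-- ===== Notes on version B (the rewrite author's own statement) =====
-- stated objective: simpler
-- what changed: Replaces the Pell pair (m,n) with its quadratic form 2m^2+2mn and the mutated two-element list by the closed linear recurrence v' = 6v - prev on the emitted values themselves, dropping the unused psum accumulator.
import Mathlib
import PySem

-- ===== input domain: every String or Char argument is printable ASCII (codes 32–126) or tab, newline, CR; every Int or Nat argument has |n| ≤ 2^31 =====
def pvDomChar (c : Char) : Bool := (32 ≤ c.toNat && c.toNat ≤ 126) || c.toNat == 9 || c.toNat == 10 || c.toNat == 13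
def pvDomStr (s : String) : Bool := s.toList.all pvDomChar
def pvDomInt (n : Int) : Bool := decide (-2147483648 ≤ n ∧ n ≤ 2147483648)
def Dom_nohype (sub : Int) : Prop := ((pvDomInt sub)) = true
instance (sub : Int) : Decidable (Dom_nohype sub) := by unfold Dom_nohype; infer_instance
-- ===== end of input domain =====

-- B replaces A's Pell pair and mutated two-element list by the linear recurrence
-- v' = 6v - prev on the emitted values, dropping the unused psum accumulator (objective: simpler).

-- ===== PORT A =====
-- A's `recurrence` list always has exactly two elements [n, m] (append then pop(0));
-- the port carries those two elements as n, m. The proof arguments hn, hm only feed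
-- the termination measure; they do not alter the computation.
def nohypeLoop (sub m n psum : Int) (other : List Int)
    (hm : 1 ≤ m) (hn : 1 ≤ n) : List Int :=
  if h : 2*m^2 + 2*m*n < sub then
    nohypeLoop sub (2*m + n) m (psum + (2*m^2 + 2*m*n)) (other ++ [2*m^2 + 2*m*n])
      (by nlinarith) (by nlinarith)
  else other
termination_by (sub - (2*m^2 + 2*m*n)).toNat
decreasing_by
  have : 2*m^2 + 2*m*n < 2*(2*m+n)^2 + 2*(2*m+n)*m := by nlinarith
  omega

def nohype (sub : Int) : List Int :=
  nohypeLoop sub 2 1 0 [] (by norm_num) (by norm_num)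

-- ===== PORT B =====
def nohypeAltLoop (sub prev cur : Int) (out : List Int)
    (hc : 12 ≤ cur) (hp : prev < cur) : List Int :=
  if h : cur < sub then
    nohypeAltLoop sub cur (6*cur - prev) (out ++ [cur]) (by nlinarith) (by nlinarith)
  else out
termination_by (sub - cur).toNat
decreasing_by
  have : cur < 6*cur - prev := by nlinarith
  omega

def nohype_alt (sub : Int) : List Int :=
  nohypeAltLoop sub 2 12 [] (by norm_num) (by norm_num)

-- ===== PRECONDITION & SPEC =====
def Spec_nohype (sub : Int) (out : List Int) : Prop := out = nohype_alt sub
instance (sub : Int) (out : List Int) : Decidable (Spec_nohype sub out) := by unfold Spec_nohype; infer_instance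

-- ===== CLAIM (what is proved, stated in full; the proofs are below) =====
def Claim_equal_nohype : Prop := ∀ (sub : Int), Dom_nohype sub → Spec_nohype sub (nohype sub)

-- ===== LEMMAS AND PROOFS =====

-- Loop correspondence: cur = 2m^2+2mn (the value A is about to test) and
-- prev = 2mn-2n^2 (the previously emitted value, since (m,n) came from (2m_0+n_0, m_0)).
theorem loop_eq (sub m n psum : Int) (acc : List Int)
    (hm2 : 2*n ≤ m) (hn : 1 ≤ n) (hm : 1 ≤ m) (hc : 12 ≤ 2*m^2 + 2*m*n)
    (hp : 2*m*n - 2*n^2 < 2*m^2 + 2*m*n) :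
    nohypeLoop sub m n psum acc hm hn
      = nohypeAltLoop sub (2*m*n - 2*n^2) (2*m^2 + 2*m*n) acc hc hp := by
  rw [nohypeLoop, nohypeAltLoop]
  split_ifs with h
  · have e1 : 6*(2*m^2 + 2*m*n) - (2*m*n - 2*n^2) = 2*(2*m+n)^2 + 2*(2*m+n)*m := by ring
    have e2 : 2*(2*m+n)*m - 2*m^2 = 2*m^2 + 2*m*n := by ring
    have hrec := loop_eq sub (2*m + n) m (psum + (2*m^2 + 2*m*n)) (acc ++ [2*m^2 + 2*m*n])
      (by nlinarith) (by nlinarith) (by nlinarith) (by nlinarith) (by nlinarith)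
    rw [hrec]
    (congr 1; ring)
  · rfl
termination_by (sub - (2*m^2 + 2*m*n)).toNat
decreasing_by
  have : 2*m^2 + 2*m*n < 2*(2*m+n)^2 + 2*(2*m+n)*m := by nlinarith
  omega

-- ===== VERDICT (by name: the statement is the Claim_ definition above) =====
theorem nohype_spec : Claim_equal_nohype := by
  intro sub _
  unfold Spec_nohype nohype nohype_alt
  have h := loop_eq sub 2 1 0 [] (by norm_num) (by norm_num) (by norm_num) (by norm_num) (by norm_num)
  simpa using h
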